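-- pv_equiv track=rewrite | github.com/Callbackelite/HomeSchool | system/apis/openlibrary/book_search.py | get_reading_level
-- ===== SOURCE A (Python) =====
-- def get_reading_level(book):
--     """Estimate reading level based on book metadata"""
--     title = book.get('title', '')
--     subjects = book.get('subject', [])
--
--     # Simple heuristics for reading level
--     if any('picture book' in subject.lower() for subject in subjects):
--         return 1
--     elif any('early reader' in subject.lower() for subject in subjects):
--         return 2
--     elif any('chapter book' in subject.lower() for subject in subjects):
--         return 3
--     elif any('middle grade' in subject.lower() for subject in subjects):
--         return 5
--     elif any('young adult' in subject.lower() for subject in subjects):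
--         return 8
--     else:
--         return 5  # Default to middle grade
-- ===== SOURCE B (Python) =====
-- _KEYWORDS = [('picture book', 1), ('early reader', 2), ('chapter book', 3),
--              ('middle grade', 5), ('young adult', 8)]
--
-- def get_reading_level(book):
--     """Estimate reading level based on book metadata"""
--     subjects = book.get('subject', [])
--     best = None  # (priority index, level) of the best keyword seen so far
--     for subject in subjects:
--         s = subject.lower()
--         for i, (kw, lvl) in enumerate(_KEYWORDS):
--             if kw in s:
--                 if best is None or i < best[0]:
--                     best = (i, lvl)
--     return best[1] if best is not None else 5
-- ===== Notes on version B (the rewrite author's own statement) =====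
-- stated objective: simpler
-- what changed: Replaces five sequential any(...) scans over the subject list by a single pass that tracks the minimum-priority keyword match in a data-driven (keyword, level) table.
import Mathlib
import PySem

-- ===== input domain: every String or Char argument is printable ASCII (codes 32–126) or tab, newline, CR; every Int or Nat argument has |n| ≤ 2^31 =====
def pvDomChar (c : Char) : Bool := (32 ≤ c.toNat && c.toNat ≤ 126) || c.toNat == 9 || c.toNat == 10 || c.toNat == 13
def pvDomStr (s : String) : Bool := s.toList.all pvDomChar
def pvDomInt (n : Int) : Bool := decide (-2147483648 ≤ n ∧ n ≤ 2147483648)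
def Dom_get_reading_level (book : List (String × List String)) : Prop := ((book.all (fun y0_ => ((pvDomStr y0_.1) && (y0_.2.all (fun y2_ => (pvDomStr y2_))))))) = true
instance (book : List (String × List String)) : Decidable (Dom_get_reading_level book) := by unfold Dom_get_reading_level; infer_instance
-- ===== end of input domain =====

-- B replaces A's five sequential any(...) scans by one pass over the subjects that
-- tracks the minimum-priority keyword match in a data-driven (keyword, level) table ("simpler").


-- ===== PORT A =====
def get_reading_level (book : List (String × List String)) : Int :=
  let subjects : List String := (book.lookup "subject").getD []
  if subjects.any (fun subject => PySem.Str.isIn "picture book" (PySem.Str.lower subject)) then 1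
  else if subjects.any (fun subject => PySem.Str.isIn "early reader" (PySem.Str.lower subject)) then 2
  else if subjects.any (fun subject => PySem.Str.isIn "chapter book" (PySem.Str.lower subject)) then 3
  else if subjects.any (fun subject => PySem.Str.isIn "middle grade" (PySem.Str.lower subject)) then 5
  else if subjects.any (fun subject => PySem.Str.isIn "young adult" (PySem.Str.lower subject)) then 8
  else 5

-- ===== PORT B =====
def pvKeywords : List (String × Int) :=
  [("picture book", 1), ("early reader", 2), ("chapter book", 3), ("middle grade", 5), ("young adult", 8)]

-- the body of Source B's inner loop: `if kw in s and (best is None or i < best[0]): best = (i, lvl)`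
def pvUpd (s : String) (best : Option (Int × Int)) (p : Int × String × Int) : Option (Int × Int) :=
  if PySem.Str.isIn p.2.1 s then
    if best.isNone || decide (p.1 < (best.getD (0, 0)).1) then some (p.1, p.2.2) else best
  else best

-- the body of Source B's outer loop: s = subject.lower(); for i, (kw, lvl) in enumerate(_KEYWORDS): ...
def pvStep (best : Option (Int × Int)) (subject : String) : Option (Int × Int) :=
  let s := PySem.Str.lower subject
  (PySem.List.enumerate pvKeywords).foldl (pvUpd s) best

def get_reading_level_alt (book : List (String × List String)) : Int :=
  let subjects : List String := (book.lookup "subject").getD []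
  match subjects.foldl pvStep none with
  | some b => b.2
  | none => 5

-- ===== PRECONDITION & SPEC =====
def Spec_get_reading_level (book : List (String × List String)) (out : Int) : Prop := out = get_reading_level_alt book
instance (book : List (String × List String)) (out : Int) : Decidable (Spec_get_reading_level book out) := by unfold Spec_get_reading_level; infer_instance

-- ===== CLAIM (what is proved, stated in full; the proofs are below) =====
def Claim_equal_get_reading_level : Prop := ∀ (book : List (String × List String)), Dom_get_reading_level book → Spec_get_reading_level book (get_reading_level book)

-- ===== LEMMAS AND PROOFS =====

-- left-biased minimum by priority index
def pvMinO (a b : Option (Int × Int)) : Option (Int × Int) :=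
  match a, b with
  | none, b => b
  | a, none => a
  | some x, some y => if y.1 < x.1 then some y else some x

-- the candidate one table row contributes for one (lowercased) subject
def pvOne (s : String) (p : Int × String × Int) : Option (Int × Int) :=
  if PySem.Str.isIn p.2.1 s then some (p.1, p.2.2) else none

-- the best match within a single subject
def pvFirst (subject : String) : Option (Int × Int) :=
  let s := PySem.Str.lower subject
  if PySem.Str.isIn "picture book" s then some (0, 1)
  else if PySem.Str.isIn "early reader" s then some (1, 2)
  else if PySem.Str.isIn "chapter book" s then some (2, 3)
  else if PySem.Str.isIn "middle grade" s then some (3, 5)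
  else if PySem.Str.isIn "young adult" s then some (4, 8)
  else none

-- the best match over a whole list of subjects, as A's if-tree produces it
def pvLeast (l : List String) : Option (Int × Int) :=
  if l.any (fun s => PySem.Str.isIn "picture book" (PySem.Str.lower s)) then some (0, 1)
  else if l.any (fun s => PySem.Str.isIn "early reader" (PySem.Str.lower s)) then some (1, 2)
  else if l.any (fun s => PySem.Str.isIn "chapter book" (PySem.Str.lower s)) then some (2, 3)
  else if l.any (fun s => PySem.Str.isIn "middle grade" (PySem.Str.lower s)) then some (3, 5)
  else if l.any (fun s => PySem.Str.isIn "young adult" (PySem.Str.lower s)) then some (4, 8)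
  else none

theorem pvMinO_none_left (b : Option (Int × Int)) : pvMinO none b = b := by
  cases b <;> rfl

theorem pvMinO_none_right (a : Option (Int × Int)) : pvMinO a none = a := by
  cases a <;> rfl

theorem pvUpd_eq_minO (s : String) (best : Option (Int × Int)) (p : Int × String × Int) :
    pvUpd s best p = pvMinO best (pvOne s p) := by
  rcases best with _ | ⟨j, lv⟩ <;>
    rcases Bool.eq_false_or_eq_true (PySem.Str.isIn p.2.1 s) with h | h <;>
    simp only [pvUpd, pvOne, pvMinO, h, Bool.false_eq_true, if_false, if_true,
      Option.isNone_none, Option.isNone_some, Option.getD_some, Bool.true_or, Bool.false_or,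
      decide_eq_true_eq]

theorem pvMinO_assoc (a b c : Option (Int × Int)) :
    pvMinO (pvMinO a b) c = pvMinO a (pvMinO b c) := by
  rcases a with _ | ⟨x1, x2⟩
  · simp [pvMinO_none_left]
  rcases b with _ | ⟨y1, y2⟩
  · simp [pvMinO_none_left, pvMinO_none_right]
  rcases c with _ | ⟨z1, z2⟩
  · simp [pvMinO_none_right]
  by_cases h1 : y1 < x1 <;> by_cases h2 : z1 < y1 <;> by_cases h3 : z1 < x1 <;>
    simp [pvMinO, h1, h2, h3] <;> omega

theorem pvFoldMin {α : Type} (g : α → Option (Int × Int)) (l : List α) (best : Option (Int × Int)) :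
    l.foldl (fun b p => pvMinO b (g p)) best =
      pvMinO best (l.foldl (fun b p => pvMinO b (g p)) none) := by
  induction l generalizing best with
  | nil => simp [pvMinO_none_right]
  | cons p l ih =>
    rw [List.foldl_cons, ih (pvMinO best (g p)), List.foldl_cons, ih (pvMinO none (g p)),
      pvMinO_none_left, pvMinO_assoc]

theorem pvStep_eq_minO (acc : Option (Int × Int)) (s : String) :
    pvStep acc s = pvMinO acc (pvFirst s) := by
  have hupd : pvUpd (PySem.Str.lower s) = fun b p => pvMinO b (pvOne (PySem.Str.lower s) p) :=
    funext fun b => funext fun p => pvUpd_eq_minO (PySem.Str.lower s) b p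
  show (PySem.List.enumerate pvKeywords).foldl (pvUpd (PySem.Str.lower s)) acc = _
  rw [hupd, pvFoldMin]
  congr 1
  simp only [pvKeywords, PySem.List.enumerate_cons, PySem.List.enumerate_nil,
    List.foldl_cons, List.foldl_nil, pvFirst, pvOne]
  rcases Bool.eq_false_or_eq_true (PySem.Str.isIn "picture book" (PySem.Str.lower s)) with hb0 | hb0 <;>
  rcases Bool.eq_false_or_eq_true (PySem.Str.isIn "early reader" (PySem.Str.lower s)) with hb1 | hb1 <;>
  rcases Bool.eq_false_or_eq_true (PySem.Str.isIn "chapter book" (PySem.Str.lower s)) with hb2 | hb2 <;>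
  rcases Bool.eq_false_or_eq_true (PySem.Str.isIn "middle grade" (PySem.Str.lower s)) with hb3 | hb3 <;>
  rcases Bool.eq_false_or_eq_true (PySem.Str.isIn "young adult" (PySem.Str.lower s)) with hb4 | hb4 <;>
  simp only [hb0, hb1, hb2, hb3, hb4, Bool.false_eq_true, if_false, if_true, pvMinO] <;>
  decide

theorem pvFoldl_eq_least (l : List String) :
    l.foldl pvStep none = pvLeast l := by
  induction l with
  | nil => rfl
  | cons s l ih =>
    have h1 : (s :: l).foldl pvStep none = pvMinO (pvFirst s) (pvLeast l) := by
      have hstep : pvStep = fun b p => pvMinO b (pvFirst p) :=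
        funext fun b => funext fun p => pvStep_eq_minO b p
      rw [List.foldl_cons, hstep, pvFoldMin, ← hstep, ih, pvStep_eq_minO, pvMinO_none_left]
    rw [h1]
    simp only [pvLeast, List.any_cons, pvFirst]
    rcases Bool.eq_false_or_eq_true (PySem.Str.isIn "picture book" (PySem.Str.lower s)) with hb0 | hb0 <;>
    rcases Bool.eq_false_or_eq_true (PySem.Str.isIn "early reader" (PySem.Str.lower s)) with hb1 | hb1 <;>
    rcases Bool.eq_false_or_eq_true (PySem.Str.isIn "chapter book" (PySem.Str.lower s)) with hb2 | hb2 <;>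
    rcases Bool.eq_false_or_eq_true (PySem.Str.isIn "middle grade" (PySem.Str.lower s)) with hb3 | hb3 <;>
    rcases Bool.eq_false_or_eq_true (PySem.Str.isIn "young adult" (PySem.Str.lower s)) with hb4 | hb4 <;>
    simp only [hb0, hb1, hb2, hb3, hb4, Bool.false_or, Bool.true_or, if_true, if_false,
      Bool.false_eq_true, pvMinO_none_left] <;>
    split_ifs <;> rfl

-- ===== VERDICT (by name: the statement is the Claim_ definition above) =====
theorem get_reading_level_spec : Claim_equal_get_reading_level := by
  intro book _
  show get_reading_level book = get_reading_level_alt book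
  simp only [get_reading_level, get_reading_level_alt]
  rw [pvFoldl_eq_least]
  simp only [pvLeast]
  split_ifs <;> rfl
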